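-- pv_equiv track=rewrite | github.com/nikita-panacea/skin-disease-classification | phase2_bulk_extraction.py | _format_vocabulary_for_prompt
-- ===== SOURCE A (Python) =====
-- from collections import defaultdict
--
-- def _format_vocabulary_for_prompt(
--     all_feature_names: list[str],
--     feature_categories: dict[str, str],
-- ) -> str:
--     """Render the per-category canonical vocabulary block for the system prompt."""
--     by_cat: dict[str, list[str]] = defaultdict(list)
--     for name in all_feature_names:
--         cat = feature_categories.get(name, "other")
--         val = name[len(cat) + 1:] if name.startswith(cat + "_") else name
--         by_cat[cat].append(val)
--
--     lines = []
--     for cat in sorted(by_cat):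
--         vals = sorted(by_cat[cat])
--         lines.append(f"  {cat}: [{', '.join(vals)}]")
--     return "\n".join(lines)
-- ===== SOURCE B (Python) =====
-- def _format_vocabulary_for_prompt(
--     all_feature_names: list[str],
--     feature_categories: dict[str, str],
-- ) -> str:
--     """Render the per-category canonical vocabulary block for the system prompt."""
--     pairs = [_resolve(name, feature_categories) for name in all_feature_names]
--     cats = sorted({c for c, _ in pairs})
--     lines = [
--         "  {}: [{}]".format(cat, ", ".join(sorted(v for c, v in pairs if c == cat)))
--         for cat in cats
--     ]
--     return "\n".join(lines)
--
--
-- def _resolve(name, feature_categories):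
--     cat = feature_categories.get(name, "other")
--     val = name[len(cat) + 1:] if name.startswith(cat + "_") else name
--     return (cat, val)
-- ===== Notes on version B (the rewrite author's own statement) =====
-- stated objective: alternative
-- what changed: Replaces A's defaultdict-of-lists grouping with a flat resolved (category, value) pair list: distinct categories come from a set, and each category's values are gathered by filtering that pair list per category.
import Mathlib
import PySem

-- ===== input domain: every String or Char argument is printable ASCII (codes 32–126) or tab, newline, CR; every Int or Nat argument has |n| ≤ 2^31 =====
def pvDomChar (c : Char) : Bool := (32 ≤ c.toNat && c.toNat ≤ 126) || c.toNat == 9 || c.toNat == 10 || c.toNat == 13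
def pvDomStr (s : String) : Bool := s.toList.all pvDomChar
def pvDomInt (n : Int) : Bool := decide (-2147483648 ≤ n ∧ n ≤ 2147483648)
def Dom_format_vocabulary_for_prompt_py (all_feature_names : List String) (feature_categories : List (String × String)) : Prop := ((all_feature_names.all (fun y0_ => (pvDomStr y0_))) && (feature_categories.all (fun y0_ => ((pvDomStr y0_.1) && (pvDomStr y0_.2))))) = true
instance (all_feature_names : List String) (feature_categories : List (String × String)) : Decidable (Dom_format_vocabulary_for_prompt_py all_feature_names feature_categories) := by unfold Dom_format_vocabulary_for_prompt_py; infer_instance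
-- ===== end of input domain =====

-- B replaces A's defaultdict grouping by a flat resolved (category, value) pair list,
-- reading distinct categories from a set and gathering each category's values by filtering
-- that list (objective: alternative decomposition, same results).

-- ===== PORT A =====
def format_vocabulary_for_prompt_py (all_feature_names : List String) (feature_categories : List (String × String)) : String :=
  let fc := PySem.Dict.mk feature_categories
  let by_cat : PySem.Dict String (List String) :=
    all_feature_names.foldl (fun d name =>
      let cat := fc.getD name "other"
      let val := if PySem.Str.startswith name (cat ++ "_")
                 then PySem.Str.slice name (some ((PySem.Str.len cat : Int) + 1)) none
                 else name
      d.modify cat [] (· ++ [val])) PySem.Dict.empty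
  let lines : List String :=
    (PySem.List.sorted by_cat.keys (fun c => c) false).foldl (fun acc cat =>
      let vals := PySem.List.sorted (by_cat.getD cat []) (fun v => v) false
      acc ++ ["  " ++ cat ++ ": [" ++ PySem.Str.join ", " vals ++ "]"]) []
  PySem.Str.join "\n" lines

-- ===== PORT B =====
def pvResolve (feature_categories : List (String × String)) (name : String) : String × String :=
  let cat := (PySem.Dict.mk feature_categories).getD name "other"
  let val := if PySem.Str.startswith name (cat ++ "_")
             then PySem.Str.slice name (some ((PySem.Str.len cat : Int) + 1)) none
             else name
  (cat, val)

def format_vocabulary_for_prompt_py_alt (all_feature_names : List String) (feature_categories : List (String × String)) : String :=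
  let pairs := all_feature_names.map (pvResolve feature_categories)
  let cats := PySem.List.sorted (PySem.Set.ofList (pairs.map (·.1))) (fun c => c) false
  let lines := cats.map (fun cat =>
    "  " ++ cat ++ ": [" ++
      PySem.Str.join ", " (PySem.List.sorted ((pairs.filter (fun p => p.1 == cat)).map (·.2)) (fun v => v) false)
      ++ "]")
  PySem.Str.join "\n" lines

-- ===== PRECONDITION & SPEC =====
def Spec_format_vocabulary_for_prompt_py (all_feature_names : List String) (feature_categories : List (String × String)) (out : String) : Prop := out = format_vocabulary_for_prompt_py_alt all_feature_names feature_categories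
instance (all_feature_names : List String) (feature_categories : List (String × String)) (out : String) : Decidable (Spec_format_vocabulary_for_prompt_py all_feature_names feature_categories out) := by unfold Spec_format_vocabulary_for_prompt_py; infer_instance

-- ===== CLAIM (what is proved, stated in full; the proofs are below) =====
def Claim_equal_format_vocabulary_for_prompt_py : Prop := ∀ (all_feature_names : List String) (feature_categories : List (String × String)), Dom_format_vocabulary_for_prompt_py all_feature_names feature_categories → Spec_format_vocabulary_for_prompt_py all_feature_names feature_categories (format_vocabulary_for_prompt_py all_feature_names feature_categories)

-- ===== LEMMAS AND PROOFS =====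

-- A's grouping dict, rewritten as a fold over the resolved pairs.
theorem pv_byCat_eq (all_feature_names : List String) (feature_categories : List (String × String)) :
    (all_feature_names.foldl (fun d name =>
      let cat := (PySem.Dict.mk feature_categories).getD name "other"
      let val := if PySem.Str.startswith name (cat ++ "_")
                 then PySem.Str.slice name (some ((PySem.Str.len cat : Int) + 1)) none
                 else name
      d.modify cat [] (· ++ [val])) PySem.Dict.empty)
    = (all_feature_names.map (pvResolve feature_categories)).foldl
        (fun d p => d.modify p.1 [] (· ++ [p.2])) PySem.Dict.empty := by
  rw [List.foldl_map]
  rfl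

-- ===== VERDICT (by name: the statement is the Claim_ definition above) =====
theorem format_vocabulary_for_prompt_py_spec : Claim_equal_format_vocabulary_for_prompt_py := by
  intro names fcs _
  show format_vocabulary_for_prompt_py names fcs = format_vocabulary_for_prompt_py_alt names fcs
  unfold format_vocabulary_for_prompt_py format_vocabulary_for_prompt_py_alt
  dsimp only
  rw [pv_byCat_eq names fcs]
  rw [PySem.Dict.keys_foldl_modify_key (List.map (pvResolve fcs) names) Prod.fst []
        (fun _ p => (fun x => x ++ [p.2])) PySem.Dict.empty]
  rw [PySem.List.foldl_append_singleton_eq_map]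
  simp only [PySem.Dict.getD_foldl_modify_append, PySem.Dict.getD_empty, PySem.Dict.keys_empty,
    List.nil_append]
  rfl
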